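-- pv_equiv track=rewrite | github.com/john-nng/PrairieLearn | testCourse/questions/addNumbers/server.py | generate_values
-- ===== SOURCE A (Python) =====
-- from functools import reduce
--
-- def generate_values(variant_id, keeps):
--     """
--     Description: a helper function that generating parameters' values
--                  based on variant id and parameter constrains (keeps).
--     Input:
--         variant_id: id of the variant.
--         keeps: a list of constrains for each parameter.
--     Output:
--         return a list that contains the value of each parameter.
--         also returns a number for total number of variants
--     """
--     result = []
--     ranges = [len(k) for k in keeps]
--     for i in range(len(keeps) - 1):
--         ranges_product = reduce((lambda x, y: x * y), ranges[i+1:])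
--         result.append(keeps[i][(variant_id//ranges_product)%len(keeps[i])])
--     result.append(keeps[-1][variant_id%ranges[-1]])
--     n_variant = reduce((lambda x, y: x * y), [len(k) for k in keeps])
--     return result, n_variant
-- ===== SOURCE B (Python) =====
-- def generate_values(variant_id, keeps):
--     # One backward pass with a running suffix product instead of re-reducing
--     # the suffix for every index.
--     result = []
--     prod = 1
--     for k in reversed(keeps):
--         result.append(k[(variant_id // prod) % len(k)])
--         prod *= len(k)
--     result.reverse()
--     return result, prod
-- ===== Notes on version B (the rewrite author's own statement) =====
-- stated objective: faster
-- what changed: Replaces the per-index reduce over each suffix slice (quadratic) by a single backward pass that maintains a running suffix product.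
import Mathlib
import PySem

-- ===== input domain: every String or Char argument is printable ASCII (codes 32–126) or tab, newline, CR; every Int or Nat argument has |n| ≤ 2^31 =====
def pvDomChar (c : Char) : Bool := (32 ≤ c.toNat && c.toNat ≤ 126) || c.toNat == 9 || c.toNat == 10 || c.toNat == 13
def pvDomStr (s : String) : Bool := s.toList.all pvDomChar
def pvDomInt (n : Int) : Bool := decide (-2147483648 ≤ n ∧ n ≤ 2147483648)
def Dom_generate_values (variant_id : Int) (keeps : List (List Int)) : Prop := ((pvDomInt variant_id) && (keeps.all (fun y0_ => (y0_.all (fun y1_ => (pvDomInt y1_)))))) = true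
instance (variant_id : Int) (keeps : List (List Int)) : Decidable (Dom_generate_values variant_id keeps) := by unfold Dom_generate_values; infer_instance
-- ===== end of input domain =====

-- B replaces A's reduce-over-each-suffix-slice by one backward pass with a running suffix product (faster).

-- ===== PORT A =====
-- functools.reduce(mul, xs): Python raises TypeError on []; under Pre_ every call here gets a nonempty list
def reduceMul : List Int → Int
  | [] => 1
  | x :: t => t.foldl (· * ·) x

def generate_values (variant_id : Int) (keeps : List (List Int)) : List Int × Int :=
  let ranges : List Int := keeps.map (fun k => (k.length : Int))
  let result : List Int :=
    (PySem.List.pyRange 0 ((keeps.length : Int) - 1) 1).foldl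
      (fun acc i =>
        let ranges_product := reduceMul (PySem.List.slice ranges (some (i + 1)) none)
        let ki := PySem.List.pyGetD keeps i []
        acc ++ [PySem.List.pyGetD ki (PySem.Int.mod (PySem.Int.floordiv variant_id ranges_product) (ki.length : Int)) 0]) []
  let result := result ++
      [PySem.List.pyGetD (PySem.List.pyGetD keeps (-1) [])
        (PySem.Int.mod variant_id (PySem.List.pyGetD ranges (-1) 0)) 0]
  let n_variant := reduceMul (keeps.map (fun k => (k.length : Int)))
  (result, n_variant)

-- ===== PORT B =====
def generate_values_alt (variant_id : Int) (keeps : List (List Int)) : List Int × Int :=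
  let st := keeps.reverse.foldl
    (fun (st : List Int × Int) k =>
      (st.1 ++ [PySem.List.pyGetD k (PySem.Int.mod (PySem.Int.floordiv variant_id st.2) (k.length : Int)) 0],
       st.2 * (k.length : Int)))
    ([], 1)
  (st.1.reverse, st.2)

-- ===== PRECONDITION & SPEC =====
-- A raises on keeps = [] (IndexError on keeps[-1] / TypeError in reduce) and on any empty
-- inner list (ZeroDivisionError in the modulo); Pre_ excludes exactly those inputs.
def Pre_generate_values (variant_id : Int) (keeps : List (List Int)) : Prop :=
  keeps ≠ [] ∧ ∀ k ∈ keeps, k ≠ []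
instance (variant_id : Int) (keeps : List (List Int)) : Decidable (Pre_generate_values variant_id keeps) := by unfold Pre_generate_values; infer_instance
def pvWitness_generate_values : Int × List (List Int) := (5, [[10, 20], [1, 2, 3]])

def Spec_generate_values (variant_id : Int) (keeps : List (List Int)) (out : List Int × Int) : Prop := out = generate_values_alt variant_id keeps
instance (variant_id : Int) (keeps : List (List Int)) (out : List Int × Int) : Decidable (Spec_generate_values variant_id keeps out) := by unfold Spec_generate_values; infer_instance

-- ===== CLAIM (what is proved, stated in full; the proofs are below) =====
def Claim_equal_generate_values : Prop := ∀ (variant_id : Int) (keeps : List (List Int)), Dom_generate_values variant_id keeps → Pre_generate_values variant_id keeps → Spec_generate_values variant_id keeps (generate_values variant_id keeps)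

-- ===== LEMMAS AND PROOFS =====

-- prodLen keeps = the product of the inner lengths; specList = the intended value list,
-- each parameter picked with the suffix product of the lengths after it.
def prodLen : List (List Int) → Int
  | [] => 1
  | k :: t => (k.length : Int) * prodLen t

def pvElem (vid : Int) (k : List Int) (p : Int) : Int :=
  PySem.List.pyGetD k (PySem.Int.mod (PySem.Int.floordiv vid p) (k.length : Int)) 0

def specList (vid : Int) : List (List Int) → List Int
  | [] => []
  | k :: t => pvElem vid k (prodLen t) :: specList vid t

-- the body of A's loop, as the function mapped over the index range
def fA (vid : Int) (keeps : List (List Int)) (i : Int) : Int :=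
  PySem.List.pyGetD (PySem.List.pyGetD keeps i [])
    (PySem.Int.mod (PySem.Int.floordiv vid
      (reduceMul (PySem.List.slice (keeps.map fun k => (k.length : Int)) (some (i + 1)) none)))
      ((PySem.List.pyGetD keeps i []).length : Int)) 0

-- A's final appended element keeps[-1][variant_id % ranges[-1]]
def lastA (vid : Int) (keeps : List (List Int)) : Int :=
  PySem.List.pyGetD (PySem.List.pyGetD keeps (-1) [])
    (PySem.Int.mod vid (PySem.List.pyGetD (keeps.map fun k => (k.length : Int)) (-1) 0)) 0

lemma foldl_mul_prodLen (l : List (List Int)) : ∀ x : Int,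
    (l.map (fun k => (k.length : Int))).foldl (· * ·) x = x * prodLen l := by
  induction l with
  | nil => intro x; simp [prodLen]
  | cons k t ih => intro x; simp [prodLen, ih]; ring

lemma reduceMul_cons (k : List Int) (t : List (List Int)) :
    reduceMul ((k.length : Int) :: t.map (fun k => (k.length : Int))) = prodLen (k :: t) := by
  simp [reduceMul, foldl_mul_prodLen, prodLen]

lemma reduceMul_map (t : List (List Int)) (h : t ≠ []) :
    reduceMul (t.map (fun k => (k.length : Int))) = prodLen t := by
  cases t with
  | nil => exact absurd rfl h
  | cons k t => simp [reduceMul, foldl_mul_prodLen, prodLen]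

lemma fA_shift (vid : Int) (k : List Int) (t : List (List Int)) (j : Nat) :
    fA vid (k :: t) (1 + (j : Int)) = fA vid t (j : Int) := by
  have h1 : (1 : Int) + (j:Int) = ((j+1 : Nat) : Int) := by push_cast; ring
  have h2 : (1 : Int) + (j:Int) + 1 = ((j+2 : Nat) : Int) := by push_cast; ring
  have h3 : (j:Int) + 1 = ((j+1 : Nat) : Int) := by push_cast; ring
  have h4 : PySem.List.pyGetD (k :: t) ((1:Int) + (j:Int)) [] = t.getD j [] := by
    rw [h1, PySem.List.pyGetD_natCast]; simp [List.getD]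
  simp only [fA]
  rw [h2, h4, h3, PySem.List.slice_from_natCast, PySem.List.slice_from_natCast]
  simp [PySem.List.pyGetD_natCast, List.getD]

lemma A_list (vid : Int) : ∀ (keeps : List (List Int)), keeps ≠ [] →
    (PySem.List.pyRange 0 ((keeps.length : Int) - 1) 1).map (fA vid keeps) ++ [lastA vid keeps]
      = specList vid keeps := by
  intro keeps
  induction keeps with
  | nil => intro h; exact absurd rfl h
  | cons k t ih =>
    intro _
    cases t with
    | nil =>
      simp [PySem.List.pyRange_one_eq_nil, specList, lastA, pvElem, prodLen,
        PySem.List.pyGetD_neg_one]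
    | cons k' t' =>
      rw [show ((k :: k' :: t').length : Int) - 1 = ((k' :: t').length : Int) by simp]
      rw [PySem.List.pyRange_one_cons (by exact_mod_cast Nat.succ_pos t'.length)]
      simp only [List.map_cons, List.cons_append]
      have htail : (PySem.List.pyRange (0+1) ((k'::t').length:Int) 1).map (fA vid (k::k'::t')) ++
          [lastA vid (k::k'::t')] = specList vid (k'::t') := by
        rw [← ih (by simp)]
        congr 1
        · rw [PySem.List.pyRange_one, PySem.List.pyRange_one]
          simp only [List.map_map]
          rw [show ((k'::t').length:Int) - (0+1) = ((k'::t').length:Int) - 1 - 0 by ring]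
          apply List.map_congr_left
          intro j hj
          simp [fA_shift]
        · simp [lastA, PySem.List.pyGetD_neg_one, List.getLast_cons]
      rw [htail]
      simp [specList, fA, pvElem, PySem.List.slice_from_one, reduceMul_cons]

lemma A_unfold (vid : Int) (keeps : List (List Int)) :
    generate_values vid keeps =
      ((PySem.List.pyRange 0 ((keeps.length : Int) - 1) 1).map (fA vid keeps) ++ [lastA vid keeps],
       reduceMul (keeps.map (fun k => (k.length : Int)))) := by
  unfold generate_values
  simp only [PySem.List.foldl_append_singleton_eq_map]
  rfl

lemma alt_foldr (vid : Int) (keeps : List (List Int)) :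
    keeps.foldr
      (fun k (st : List Int × Int) =>
        (st.1 ++ [PySem.List.pyGetD k (PySem.Int.mod (PySem.Int.floordiv vid st.2) (k.length : Int)) 0],
         st.2 * (k.length : Int)))
      ([], 1)
    = ((specList vid keeps).reverse, prodLen keeps) := by
  induction keeps with
  | nil => simp [specList, prodLen]
  | cons k t ih => simp [specList, prodLen, ih, pvElem, mul_comm]

lemma alt_eq (vid : Int) (keeps : List (List Int)) :
    generate_values_alt vid keeps = (specList vid keeps, prodLen keeps) := by
  unfold generate_values_alt
  rw [List.foldl_reverse]
  simp [alt_foldr]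

-- ===== VERDICT (by name: the statement is the Claim_ definition above) =====
theorem generate_values_spec : Claim_equal_generate_values := by
  intro vid keeps _ hpre
  unfold Spec_generate_values
  rw [alt_eq, A_unfold, A_list vid keeps hpre.1, reduceMul_map keeps hpre.1]
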